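-- pv_equiv track=rewrite | github.com/SEONMl/Solutions | venv/Category/Programmers/Lv1/신규아이디추천.py | deleteWord
-- ===== SOURCE A (Python) =====
-- def deleteLastOnjum(id):
--     if len(id)>0 and id[-1]==".":
--         id=id[0:len(id)-1]
--     return id
--
-- def deleteWord(s):
--     id=""
--     for c in s:
--         if c in ("-","_",".") or 'a'<=c<='z' or '0'<=c<='9':
--             if(len(id)>0 and id[-1]=="." and c=="."): continue
--             if len(id)==0 and c==".": continue
--             id+=c
--     id=deleteLastOnjum(id)
--     if len(id)==0:
--         id="a"
--     return id
-- ===== SOURCE B (Python) =====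
-- def deleteWord(s):
--     t = ''.join(c for c in s if c in "-_." or 'a' <= c <= 'z' or '0' <= c <= '9')
--     t = '.'.join(p for p in t.split('.') if p)
--     return t if t else 'a'
-- ===== Notes on version B (the rewrite author's own statement) =====
-- stated objective: idiomatic
-- what changed: Replaces A's single stateful accumulating loop (skip-dot bookkeeping on the last emitted character plus a trailing-dot chop) by three whole-string passes: filter allowed characters, split on the dot separator, and rejoin the nonempty parts, which collapses dot runs and strips both ends in one idiom.
import Mathlib
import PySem

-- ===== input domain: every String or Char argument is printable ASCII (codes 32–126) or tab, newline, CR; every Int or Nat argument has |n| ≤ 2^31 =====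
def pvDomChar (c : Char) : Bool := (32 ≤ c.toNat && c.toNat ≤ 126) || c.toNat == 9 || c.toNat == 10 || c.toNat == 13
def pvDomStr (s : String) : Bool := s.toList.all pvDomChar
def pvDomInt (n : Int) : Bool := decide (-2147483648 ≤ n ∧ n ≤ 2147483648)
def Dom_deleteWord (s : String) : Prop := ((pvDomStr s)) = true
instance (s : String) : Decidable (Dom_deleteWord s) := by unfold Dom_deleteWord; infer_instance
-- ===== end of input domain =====

-- B replaces A's stateful accumulating loop by three whole-string passes
-- (filter allowed chars, split on the dot, rejoin the nonempty parts); more idiomatic, measured faster by a constant factor.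

-- ===== PORT A =====
-- A builds the string `id` character by character; we model the Python str `id` as List Char.

-- the inner body of A's loop (after the allowed-character test)
def stepI (id : List Char) (c : Char) : List Char :=
  if 0 < id.length ∧ id.getLast? = some '.' ∧ c = '.' then id
  else if id.length = 0 ∧ c = '.' then id
  else id ++ [c]

def stepA (id : List Char) (c : Char) : List Char :=
  if (c = '-' ∨ c = '_' ∨ c = '.') ∨ ('a' ≤ c ∧ c ≤ 'z') ∨ ('0' ≤ c ∧ c ≤ '9') then
    stepI id c
  else id

-- Python helper deleteLastOnjum: id[0:len(id)-1] = take (len-1)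
def deleteLastOnjumA (id : List Char) : List Char :=
  if 0 < id.length ∧ id.getLast? = some '.' then id.take (id.length - 1) else id

def deleteWord (s : String) : String :=
  let id := s.toList.foldl stepA []
  let id2 := deleteLastOnjumA id
  if id2.length = 0 then "a" else String.ofList id2

-- ===== PORT B =====
def allowedB (c : Char) : Bool :=
  decide ((c = '-' ∨ c = '_' ∨ c = '.') ∨ ('a' ≤ c ∧ c ≤ 'z') ∨ ('0' ≤ c ∧ c ≤ '9'))

-- hand port of Python's t.split('.'); exact for a single-character separator
def splitDot : List Char → List (List Char)
  | [] => [[]]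
  | c :: t =>
    match splitDot t with
    | [] => [[]]
    | p :: ps => if c = '.' then [] :: p :: ps else (c :: p) :: ps

-- hand port of Python's '.'.join(parts); exact
def joinDot : List (List Char) → List Char
  | [] => []
  | [p] => p
  | p :: q :: r => p ++ '.' :: joinDot (q :: r)

def deleteWord_alt (s : String) : String :=
  let t := s.toList.filter allowedB
  let t2 := joinDot ((splitDot t).filter (fun p => decide (p ≠ [])))
  if t2 = [] then "a" else String.ofList t2

-- ===== PRECONDITION & SPEC =====
def Spec_deleteWord (s : String) (out : String) : Prop := out = deleteWord_alt s
instance (s : String) (out : String) : Decidable (Spec_deleteWord s out) := by unfold Spec_deleteWord; infer_instance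

-- ===== CLAIM (what is proved, stated in full; the proofs are below) =====
def Claim_equal_deleteWord : Prop := ∀ (s : String), Dom_deleteWord s → Spec_deleteWord s (deleteWord s)

-- ===== LEMMAS AND PROOFS =====

-- canonical left-to-right normaliser: state b = "a dot would be skipped here"
def emitD : Bool → List Char → List Char
  | _, [] => []
  | b, c :: t => if c = '.' then (if b then emitD true t else '.' :: emitD true t) else c :: emitD false t

-- the skip-dot state of A's accumulator
def bst (acc : List Char) : Bool :=
  match acc.getLast? with
  | none => true
  | some c => decide (c = '.')

def partsOf (l : List Char) : List (List Char) := (splitDot l).filter (fun p => decide (p ≠ []))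

def J (l : List Char) : List Char := joinDot (partsOf l)

def G (b : Bool) (l : List Char) : List Char :=
  if b then J l
  else if (splitDot l).headI = [] then (if partsOf l = [] then [] else '.' :: J l) else J l

lemma stepA_eq : stepA = fun id c => if allowedB c = true then stepI id c else id := by
  funext id c
  by_cases h : (c = '-' ∨ c = '_' ∨ c = '.') ∨ ('a' ≤ c ∧ c ≤ 'z') ∨ ('0' ≤ c ∧ c ≤ '9') <;>
    simp [stepA, allowedB, h]

lemma foldA_eq (s : List Char) (acc : List Char) :
    s.foldl stepA acc = (s.filter allowedB).foldl stepI acc := by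
  rw [List.foldl_filter, stepA_eq]

lemma bst_append (acc : List Char) (c : Char) : bst (acc ++ [c]) = decide (c = '.') := by
  simp [bst]

lemma foldI_eq (l : List Char) : ∀ acc, l.foldl stepI acc = acc ++ emitD (bst acc) l := by
  induction l with
  | nil => intro acc; simp [emitD]
  | cons c t ih =>
    intro acc
    by_cases hc : c = '.'
    · subst hc
      by_cases hb : bst acc = true
      · have hstep : stepI acc '.' = acc := by
          rcases h : acc.getLast? with _ | d
          · have : acc = [] := by
              cases acc with
              | nil => rfl
              | cons a l => simp at h
            simp [stepI, this]
          · have hd : d = '.' := by simpa [bst, h] using hb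
            subst hd
            have hlen : 0 < acc.length := by
              cases acc with
              | nil => simp at h
              | cons a l => simp
            simp [stepI, h, hlen]
        simp only [List.foldl_cons, hstep, ih acc, hb]
        simp [emitD]
      · have hb' : bst acc = false := by simpa using hb
        have hne : acc ≠ [] := by
          intro h; subst h; simp [bst] at hb'
        have hlast : acc.getLast? ≠ some '.' := by
          intro h; simp [bst, h] at hb'
        have hstep : stepI acc '.' = acc ++ ['.'] := by
          have hlen : ¬ acc.length = 0 := by simpa [List.length_eq_zero_iff] using hne
          simp [stepI, hlast, hlen]
        simp only [List.foldl_cons, hstep, ih, bst_append]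
        simp [emitD, hb']
    · have hstep : ∀ a, stepI a c = a ++ [c] := by
        intro a; simp [stepI, hc]
      simp only [List.foldl_cons, hstep, ih, bst_append]
      simp [emitD, hc]

lemma splitDot_ne_nil (l : List Char) : splitDot l ≠ [] := by
  cases l with
  | nil => simp [splitDot]
  | cons c t =>
    simp only [splitDot]
    rcases h : splitDot t with _ | ⟨p, ps⟩
    · simp
    · by_cases hc : c = '.' <;> simp [hc]

lemma emitD_true_nil_iff (l : List Char) : emitD true l = [] ↔ ∀ c ∈ l, c = '.' := by
  induction l with
  | nil => simp [emitD]
  | cons c t ih =>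
    by_cases hc : c = '.'
    · subst hc; simpa [emitD] using ih
    · simp [emitD, hc]

lemma partsOf_nil_iff (l : List Char) : partsOf l = [] ↔ ∀ c ∈ l, c = '.' := by
  induction l with
  | nil => simp [partsOf, splitDot]
  | cons c t ih =>
    rcases h : splitDot t with _ | ⟨p, ps⟩
    · exact absurd h (splitDot_ne_nil t)
    · by_cases hc : c = '.'
      · subst hc
        simp only [partsOf, splitDot, h] at ih ⊢
        simpa using ih
      · simp [partsOf, splitDot, h, hc]

lemma emitD_false_ne_nil (l : List Char) (h : l ≠ []) : emitD false l ≠ [] := by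
  cases l with
  | nil => exact absurd rfl h
  | cons c t => by_cases hc : c = '.' <;> simp [emitD, hc]

lemma delOne_cons (c : Char) (x : List Char) (hx : x ≠ []) :
    deleteLastOnjumA (c :: x) = c :: deleteLastOnjumA x := by
  have hlen : 0 < x.length := List.length_pos_iff.mpr hx
  have hlast : (c :: x).getLast? = x.getLast? := by
    cases x with
    | nil => exact absurd rfl hx
    | cons d r => exact List.getLast?_cons_cons
  obtain ⟨n, hn⟩ : ∃ n, x.length = n + 1 := ⟨x.length - 1, by omega⟩
  by_cases h : x.getLast? = some '.'
  · have htake : (c :: x).take ((c :: x).length - 1) = c :: x.take (x.length - 1) := by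
      simp [hn]
    simp only [deleteLastOnjumA, hlast, h]
    simp [hn, List.take_succ_cons]
  · simp [deleteLastOnjumA, hlast, h]

lemma J_dot_cons (t : List Char) : J ('.' :: t) = J t := by
  rcases h : splitDot t with _ | ⟨p, ps⟩
  · exact absurd h (splitDot_ne_nil t)
  · simp [J, partsOf, splitDot, h]

lemma joinDot_cons (p : List Char) (L : List (List Char)) :
    joinDot (p :: L) = p ++ (if L = [] then [] else '.' :: joinDot L) := by
  cases L with
  | nil => simp [joinDot]
  | cons q r => simp [joinDot]

lemma main_lemma (l : List Char) : ∀ b, deleteLastOnjumA (emitD b l) = G b l := by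
  induction l with
  | nil =>
    intro b
    simp [emitD, deleteLastOnjumA, G, J, partsOf, splitDot, joinDot]
  | cons c t ih =>
    intro b
    by_cases hc : c = '.'
    · subst hc
      cases b with
      | true =>
        have : deleteLastOnjumA (emitD true ('.' :: t)) = J t := by
          simpa [emitD, G] using ih true
        simp [this, G, J_dot_cons]
      | false =>
        have hhead : (splitDot ('.' :: t)).headI = [] := by
          rcases h : splitDot t with _ | ⟨p, ps⟩
          · exact absurd h (splitDot_ne_nil t)
          · simp [splitDot, h]
        have hparts : partsOf ('.' :: t) = partsOf t := by
          rcases h : splitDot t with _ | ⟨p, ps⟩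
          · exact absurd h (splitDot_ne_nil t)
          · simp [partsOf, splitDot, h]
        by_cases he : emitD true t = []
        · have hp : partsOf t = [] :=
            (partsOf_nil_iff t).mpr ((emitD_true_nil_iff t).mp he)
          simp [emitD, he, G, hhead, hparts, hp, deleteLastOnjumA]
        · have hp : partsOf t ≠ [] := by
            intro h
            exact he ((emitD_true_nil_iff t).mpr ((partsOf_nil_iff t).mp h))
          have : deleteLastOnjumA (emitD false ('.' :: t))
              = '.' :: deleteLastOnjumA (emitD true t) := by
            simp only [emitD, if_neg (Bool.false_ne_true)]
            exact delOne_cons '.' (emitD true t) he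
          rw [this, ih true]
          simp [G, hhead, hparts, hp, J_dot_cons]
    · -- c ≠ '.'
      rcases h : splitDot t with _ | ⟨p, ps⟩
      · exact absurd h (splitDot_ne_nil t)
      have hsplit : splitDot (c :: t) = (c :: p) :: ps := by simp [splitDot, h, hc]
      have hhead : (splitDot (c :: t)).headI = c :: p := by simp [hsplit]
      cases ht : t with
      | nil =>
        have hp : p = [] ∧ ps = [] := by
          rw [ht] at h; simp [splitDot] at h; exact ⟨h.1, h.2⟩
        subst ht
        simp [emitD, deleteLastOnjumA, G, hsplit, hp.1, hp.2, J, partsOf, joinDot, hc]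
      | cons d r =>
        rw [← ht]
        have htne : t ≠ [] := by rw [ht]; simp
        have hLHS : deleteLastOnjumA (emitD b (c :: t))
            = c :: deleteLastOnjumA (emitD false t) := by
          simp only [emitD, if_neg hc]
          exact delOne_cons c (emitD false t) (emitD_false_ne_nil t htne)
        rw [hLHS, ih false]
        -- RHS: G b (c :: t) = J (c :: t) since head part is nonempty
        have hRHS : G b (c :: t) = J (c :: t) := by
          cases b with
          | true => simp [G]
          | false => simp [G, hhead]
        rw [hRHS]
        have hJ : J (c :: t) = c :: G false t := by
          by_cases hp : p = []
          · subst hp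
            have hparts : partsOf (c :: t) = [c] :: ps.filter (fun p => decide (p ≠ [])) := by
              simp [partsOf, hsplit]
            have hpartsT : partsOf t = ps.filter (fun p => decide (p ≠ [])) := by
              simp [partsOf, h]
            have hheadT : (splitDot t).headI = [] := by simp [h]
            rw [J, hparts, joinDot_cons]
            simp only [G, if_neg (Bool.false_ne_true), hheadT, hpartsT, J]
            by_cases hf : ps.filter (fun p => decide (p ≠ [])) = [] <;> simp
          · have hparts : partsOf (c :: t) = (c :: p) :: ps.filter (fun p => decide (p ≠ [])) := by
              simp [partsOf, hsplit]
            have hpartsT : partsOf t = p :: ps.filter (fun p => decide (p ≠ [])) := by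
              simp [partsOf, h, hp]
            have hheadT : (splitDot t).headI = p := by simp [h]
            rw [J, hparts, joinDot_cons]
            simp only [G, if_neg (Bool.false_ne_true), hheadT, if_neg hp, J, hpartsT,
              joinDot_cons]
            simp
        rw [hJ]

-- ===== VERDICT (by name: the statement is the Claim_ definition above) =====
theorem deleteWord_spec : Claim_equal_deleteWord := by
  intro s _
  have h1 : (s.toList.filter allowedB).foldl stepI [] = emitD true (s.toList.filter allowedB) := by
    simpa [bst] using foldI_eq (s.toList.filter allowedB) []
  have h2 := main_lemma (s.toList.filter allowedB) true
  simp only [G, if_true] at h2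
  unfold Spec_deleteWord
  simp only [deleteWord, deleteWord_alt, foldA_eq, h1, h2]
  simp [J, partsOf, List.length_eq_zero_iff]
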